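-- pv_equiv track=rewrite | github.com/bookRa/timbergem | symbol_identification/gem_v5.py | generate_scale_variations
-- ===== SOURCE A (Python) =====
-- def generate_scale_variations(target_width, target_height, variance_px):
--     """
--     Generate all scale variations within the variance range.
--     Returns list of (width, height) tuples.
--     """
--     variations = []
--     for v in range(-variance_px, variance_px + 1):
--         new_width = target_width + v
--         new_height = target_height + v
--         # Ensure positive dimensions
--         if new_width > 0 and new_height > 0:
--             variations.append((new_width, new_height))
--     return variations
-- ===== SOURCE B (Python) =====
-- def generate_scale_variations(target_width, target_height, variance_px):
--     """
--     Generate all scale variations within the variance range.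
--     Returns list of (width, height) tuples.
--     """
--     out = []
--     v = variance_px
--     # Walk downward from the largest offset; both dimensions shrink together,
--     # so the first invalid offset ends the walk (no per-element filter needed).
--     while v >= -variance_px and target_width + v > 0 and target_height + v > 0:
--         out.append((target_width + v, target_height + v))
--         v -= 1
--     out.reverse()
--     return out
-- ===== Notes on version B (the rewrite author's own statement) =====
-- stated objective: alternative
-- what changed: B walks downward from the largest offset, stopping at the first offset that violates positivity (valid since both dimensions shrink monotonically with v), collecting pairs in descending order and reversing once at the end - no range enumeration and no per-iteration filter.
import Mathlib
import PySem

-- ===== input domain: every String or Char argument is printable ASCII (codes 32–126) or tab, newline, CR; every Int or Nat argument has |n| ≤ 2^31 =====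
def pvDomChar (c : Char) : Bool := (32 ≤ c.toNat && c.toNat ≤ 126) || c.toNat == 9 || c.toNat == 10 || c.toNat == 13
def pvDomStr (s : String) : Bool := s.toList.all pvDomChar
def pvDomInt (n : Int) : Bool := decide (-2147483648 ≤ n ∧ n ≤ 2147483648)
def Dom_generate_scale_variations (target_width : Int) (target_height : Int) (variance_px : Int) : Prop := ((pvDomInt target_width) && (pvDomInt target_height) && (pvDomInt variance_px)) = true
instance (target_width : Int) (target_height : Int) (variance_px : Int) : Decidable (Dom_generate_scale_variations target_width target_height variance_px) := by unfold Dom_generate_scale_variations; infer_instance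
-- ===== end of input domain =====

-- B walks downward from the largest offset, stopping at the first positivity violation (monotone in v), and reverses once at the end (objective: alternative).


-- ===== PORT A =====
def generate_scale_variations (target_width : Int) (target_height : Int) (variance_px : Int) : List (Int × Int) :=
  (PySem.List.pyRange (-variance_px) (variance_px + 1) 1).foldl
    (fun variations v =>
      let new_width := target_width + v
      let new_height := target_height + v
      if new_width > 0 ∧ new_height > 0 then variations ++ [(new_width, new_height)]
      else variations)
    []

-- ===== PORT B =====
-- the downward while loop of Source B: collect (w+v, h+v) while the guard holds, decrementing v
def gsvDown (target_width target_height variance_px : Int) (v : Int) : List (Int × Int) :=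
  if h : v ≥ -variance_px ∧ target_width + v > 0 ∧ target_height + v > 0 then
    (target_width + v, target_height + v) :: gsvDown target_width target_height variance_px (v - 1)
  else []
termination_by (v + variance_px + 1).toNat
decreasing_by omega

def generate_scale_variations_alt (target_width : Int) (target_height : Int) (variance_px : Int) : List (Int × Int) :=
  (gsvDown target_width target_height variance_px variance_px).reverse

-- ===== PRECONDITION & SPEC =====
def Spec_generate_scale_variations (target_width : Int) (target_height : Int) (variance_px : Int) (out : List (Int × Int)) : Prop := out = generate_scale_variations_alt target_width target_height variance_px
instance (target_width : Int) (target_height : Int) (variance_px : Int) (out : List (Int × Int)) : Decidable (Spec_generate_scale_variations target_width target_height variance_px out) := by unfold Spec_generate_scale_variations; infer_instance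

-- ===== CLAIM =====
def Claim_equal_generate_scale_variations : Prop := ∀ (target_width : Int) (target_height : Int) (variance_px : Int), Dom_generate_scale_variations target_width target_height variance_px → Spec_generate_scale_variations target_width target_height variance_px (generate_scale_variations target_width target_height variance_px)

-- ===== LEMMAS AND PROOFS =====

-- A's filtered fold over [a, b) equals acc ++ the map over [max a (1 - min tw th), b),
-- since 1 - min tw th is the least offset keeping both dimensions positive.
theorem gsv_key (tw th : Int) : ∀ (n : Nat) (a b : Int) (acc : List (Int × Int)),
    (b - a).toNat ≤ n →
    (PySem.List.pyRange a b 1).foldl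
      (fun variations v =>
        let new_width := tw + v
        let new_height := th + v
        if new_width > 0 ∧ new_height > 0 then variations ++ [(new_width, new_height)]
        else variations)
      acc
    = acc ++ (PySem.List.pyRange (max a (1 - min tw th)) b 1).map (fun v => (tw + v, th + v)) := by
  intro n
  induction n with
  | zero =>
    intro a b acc h
    have hba : b ≤ a := by omega
    rw [PySem.List.pyRange_one_eq_nil hba, PySem.List.pyRange_one_eq_nil (by omega : b ≤ max a (1 - min tw th))]
    simp
  | succ n ih =>
    intro a b acc h
    by_cases hba : b ≤ a
    · rw [PySem.List.pyRange_one_eq_nil hba, PySem.List.pyRange_one_eq_nil (by omega : b ≤ max a (1 - min tw th))]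
      simp
    · rw [PySem.List.pyRange_one_cons (by omega : a < b)]
      simp only [List.foldl_cons]
      by_cases hc : 1 - min tw th ≤ a
      · have hcond : tw + a > 0 ∧ th + a > 0 := by omega
        rw [if_pos hcond, ih (a + 1) b _ (by omega)]
        have h1 : max a (1 - min tw th) = a := by omega
        have h2 : max (a + 1) (1 - min tw th) = a + 1 := by omega
        rw [h1, h2, PySem.List.pyRange_one_cons (by omega : a < b)]
        simp
      · have hcond : ¬ (tw + a > 0 ∧ th + a > 0) := by omega
        rw [if_neg hcond, ih (a + 1) b _ (by omega)]
        have h2 : max (a + 1) (1 - min tw th) = max a (1 - min tw th) := by omega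
        rw [h2]

-- B's downward walk from v collects exactly the reversed map over [max (-n) (1 - min tw th), v+1).
theorem gsvDown_eq (tw th n : Int) : ∀ (fuel : Nat) (v : Int), (v + n + 1).toNat ≤ fuel →
    gsvDown tw th n v
    = ((PySem.List.pyRange (max (-n) (1 - min tw th)) (v + 1) 1).map (fun v => (tw + v, th + v))).reverse := by
  intro fuel
  induction fuel with
  | zero =>
    intro v h
    have hv : v < -n := by omega
    rw [gsvDown, dif_neg (by omega), PySem.List.pyRange_one_eq_nil (by omega : v + 1 ≤ max (-n) (1 - min tw th))]
    simp
  | succ fuel ih =>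
    intro v h
    by_cases hg : v ≥ -n ∧ tw + v > 0 ∧ th + v > 0
    · have hlo : max (-n) (1 - min tw th) ≤ v := by omega
      rw [gsvDown, dif_pos hg, ih (v - 1) (by omega)]
      have hstep : PySem.List.pyRange (max (-n) (1 - min tw th)) (v + 1) 1
          = PySem.List.pyRange (max (-n) (1 - min tw th)) v 1 ++ [v] := by
        have := PySem.List.pyRange_one_succ_right (a := max (-n) (1 - min tw th)) (b := v) (by omega)
        simpa using this
      rw [hstep]
      have : v - 1 + 1 = v := by omega
      rw [this]
      simp
    · rw [gsvDown, dif_neg hg,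
        PySem.List.pyRange_one_eq_nil (by omega : v + 1 ≤ max (-n) (1 - min tw th))]
      simp

-- ===== VERDICT =====
theorem generate_scale_variations_spec : Claim_equal_generate_scale_variations := by
  intro tw th vp _
  unfold Spec_generate_scale_variations generate_scale_variations generate_scale_variations_alt
  rw [gsv_key tw th ((vp + 1) - (-vp)).toNat (-vp) (vp + 1) [] le_rfl,
    gsvDown_eq tw th vp (vp + vp + 1).toNat vp le_rfl]
  simp
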